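-- pv_equiv track=rewrite | github.com/zhangqiwen2004/plant | backend/apps/plants/management/commands/crawl_plant_data.py | rank_titles
-- ===== SOURCE A (Python) =====
-- def rank_titles(keyword, titles):
--     normalized_keyword = (keyword or '').replace(' ', '').lower()
--     exact = []
--     contains = []
--     others = []
--
--     for title in titles:
--         normalized_title = title.replace(' ', '').lower()
--         if normalized_title == normalized_keyword:
--             exact.append(title)
--         elif normalized_keyword and (normalized_keyword in normalized_title or normalized_title in normalized_keyword):
--             contains.append(title)
--         else:
--             others.append(title)
--
--     return exact + contains + others
-- ===== SOURCE B (Python) =====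
-- def rank_titles(keyword, titles):
--     normalized_keyword = (keyword or '').replace(' ', '').lower()
--
--     def rank(title):
--         normalized_title = title.replace(' ', '').lower()
--         if normalized_title == normalized_keyword:
--             return 0
--         if normalized_keyword and (normalized_keyword in normalized_title
--                                    or normalized_title in normalized_keyword):
--             return 1
--         return 2
--
--     return sorted(titles, key=rank)
-- ===== Notes on version B (the rewrite author's own statement) =====
-- stated objective: idiomatic
-- what changed: Replaces the three explicit bucket lists and manual concatenation with a single stable sort keyed by a 0/1/2 match rank, with the normalized keyword computed once.
import Mathlib
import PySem

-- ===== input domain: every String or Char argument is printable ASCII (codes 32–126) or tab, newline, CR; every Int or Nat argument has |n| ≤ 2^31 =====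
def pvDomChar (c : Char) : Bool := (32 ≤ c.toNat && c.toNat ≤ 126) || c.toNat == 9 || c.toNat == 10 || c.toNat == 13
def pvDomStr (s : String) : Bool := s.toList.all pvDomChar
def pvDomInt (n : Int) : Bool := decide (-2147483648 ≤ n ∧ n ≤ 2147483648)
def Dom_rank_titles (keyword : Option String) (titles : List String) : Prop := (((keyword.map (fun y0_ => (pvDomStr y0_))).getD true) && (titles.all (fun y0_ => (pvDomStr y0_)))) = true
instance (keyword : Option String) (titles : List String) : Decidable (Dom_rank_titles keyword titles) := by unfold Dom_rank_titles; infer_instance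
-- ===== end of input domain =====

-- B replaces A's three bucket lists and concatenation by one stable sort keyed by a 0/1/2 match rank (idiomatic).

-- shared normalization: s.replace(' ', '').lower()
def pvNorm (s : String) : String := PySem.Str.lower (PySem.Str.replace s " " "")

-- ===== PORT A =====
def rank_titles (keyword : Option String) (titles : List String) : List String :=
  let nk := pvNorm (keyword.getD "")
  let r := titles.foldl (fun (acc : List String × List String × List String) title =>
    let nt := pvNorm title
    if nt == nk then (acc.1 ++ [title], acc.2.1, acc.2.2)
    else if !(nk == "") && (PySem.Str.isIn nk nt || PySem.Str.isIn nt nk) then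
      (acc.1, acc.2.1 ++ [title], acc.2.2)
    else (acc.1, acc.2.1, acc.2.2 ++ [title])) ([], [], [])
  r.1 ++ r.2.1 ++ r.2.2

-- ===== PORT B =====
def pvRank (nk : String) (title : String) : Int :=
  let nt := pvNorm title
  if nt == nk then 0
  else if !(nk == "") && (PySem.Str.isIn nk nt || PySem.Str.isIn nt nk) then 1
  else 2

def rank_titles_alt (keyword : Option String) (titles : List String) : List String :=
  let nk := pvNorm (keyword.getD "")
  PySem.List.sorted titles (pvRank nk) false

-- ===== PRECONDITION & SPEC =====
def Spec_rank_titles (keyword : Option String) (titles : List String) (out : List String) : Prop := out = rank_titles_alt keyword titles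
instance (keyword : Option String) (titles : List String) (out : List String) : Decidable (Spec_rank_titles keyword titles out) := by unfold Spec_rank_titles; infer_instance

-- ===== CLAIM (what is proved, stated in full; the proofs are below) =====
def Claim_equal_rank_titles : Prop := ∀ (keyword : Option String) (titles : List String), Dom_rank_titles keyword titles → Spec_rank_titles keyword titles (rank_titles keyword titles)

-- ===== LEMMAS AND PROOFS =====

theorem insertBy_append_of_false {α : Type} (before : α → α → Bool) (x : α) (l1 l2 : List α)
    (h : ∀ y ∈ l1, before x y = false) :
    PySem.List.insertBy before x (l1 ++ l2) = l1 ++ PySem.List.insertBy before x l2 := by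
  induction l1 with
  | nil => simp
  | cons a t ih =>
    have ha : before x a = false := h a (by simp)
    simp [PySem.List.insertBy, ha, ih (fun y hy => h y (by simp [hy]))]

theorem insertBy_cons_of_true {α : Type} (before : α → α → Bool) (x : α) (l : List α)
    (h : ∀ y ∈ l, before x y = true) :
    PySem.List.insertBy before x l = x :: l := by
  cases l with
  | nil => rfl
  | cons a t => simp [PySem.List.insertBy, h a (by simp)]

-- loop invariant: A's bucket fold, starting from rank-homogeneous buckets, equals B's insertion-sort fold
theorem buckets_eq_insert (nk : String) (titles : List String) :
    ∀ (e c o : List String),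
      (∀ y ∈ e, pvRank nk y = 0) → (∀ y ∈ c, pvRank nk y = 1) → (∀ y ∈ o, pvRank nk y = 2) →
      (let r := titles.foldl (fun (acc : List String × List String × List String) title =>
          let nt := pvNorm title
          if nt == nk then (acc.1 ++ [title], acc.2.1, acc.2.2)
          else if !(nk == "") && (PySem.Str.isIn nk nt || PySem.Str.isIn nt nk) then
            (acc.1, acc.2.1 ++ [title], acc.2.2)
          else (acc.1, acc.2.1, acc.2.2 ++ [title])) (e, c, o)
       r.1 ++ r.2.1 ++ r.2.2)
      = titles.foldl (fun acc x =>
          PySem.List.insertBy (fun a b => decide (pvRank nk a < pvRank nk b)) x acc) (e ++ c ++ o) := by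
  induction titles with
  | nil => intro e c o _ _ _; simp
  | cons t ts ih =>
    intro e c o he hc ho
    by_cases h0 : (pvNorm t == nk) = true
    · have hr : pvRank nk t = 0 := by simp [pvRank, h0]
      have hins : PySem.List.insertBy (fun a b => decide (pvRank nk a < pvRank nk b)) t (e ++ c ++ o)
          = (e ++ [t]) ++ c ++ o := by
        rw [List.append_assoc,
          insertBy_append_of_false _ _ e (c ++ o)
            (fun y hy => by simp [hr, he y hy]),
          insertBy_cons_of_true _ _ (c ++ o)
            (fun y hy => by
              rcases List.mem_append.mp hy with hy | hy
              · simp [hr, hc y hy]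
              · simp [hr, ho y hy])]
        simp
      simp only [List.foldl_cons, h0, if_pos]
      rw [hins] at *
      simpa [h0] using ih (e ++ [t]) c o
        (fun y hy => by rcases List.mem_append.mp hy with hy | hy
                        · exact he y hy
                        · simp at hy; subst hy; exact hr)
        hc ho
    · by_cases h1 : (!(nk == "") && (PySem.Str.isIn nk (pvNorm t) || PySem.Str.isIn (pvNorm t) nk)) = true
      · have hr : pvRank nk t = 1 := by simp only [pvRank]; rw [if_neg h0, if_pos h1]
        have hins : PySem.List.insertBy (fun a b => decide (pvRank nk a < pvRank nk b)) t (e ++ c ++ o)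
            = e ++ (c ++ [t]) ++ o := by
          rw [List.append_assoc, List.append_assoc,
            insertBy_append_of_false _ _ e (c ++ o)
              (fun y hy => by simp [hr, he y hy]),
            insertBy_append_of_false _ _ c o
              (fun y hy => by simp [hr, hc y hy]),
            insertBy_cons_of_true _ _ o
              (fun y hy => by simp [hr, ho y hy])]
          simp
        simp only [List.foldl_cons, h0, h1, if_neg, if_pos, Bool.not_eq_true]
        rw [hins] at *
        simpa [h0, h1] using ih e (c ++ [t]) o he
          (fun y hy => by rcases List.mem_append.mp hy with hy | hy
                          · exact hc y hy
                          · simp at hy; subst hy; exact hr)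
          ho
      · have hr : pvRank nk t = 2 := by simp only [pvRank]; rw [if_neg h0, if_neg h1]
        have hins : PySem.List.insertBy (fun a b => decide (pvRank nk a < pvRank nk b)) t (e ++ c ++ o)
            = e ++ c ++ (o ++ [t]) := by
          rw [PySem.List.insertBy_of_forall_not_before _ _ _
            (fun y hy => by
              rcases List.mem_append.mp hy with hy | hy
              · rcases List.mem_append.mp hy with hy | hy
                · simp [hr, he y hy]
                · simp [hr, hc y hy]
              · simp [hr, ho y hy])]
          simp
        simp only [List.foldl_cons, h0, h1, if_neg, Bool.not_eq_true]
        rw [hins] at *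
        simpa [h0, h1] using ih e c (o ++ [t]) he hc
          (fun y hy => by rcases List.mem_append.mp hy with hy | hy
                          · exact ho y hy
                          · simp at hy; subst hy; exact hr)

-- ===== VERDICT (by name: the statement is the Claim_ definition above) =====
theorem rank_titles_spec : Claim_equal_rank_titles := by
  intro keyword titles _
  unfold Spec_rank_titles rank_titles rank_titles_alt PySem.List.sorted
  simpa using buckets_eq_insert (pvNorm (keyword.getD "")) titles [] [] []
    (by simp) (by simp) (by simp)
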